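-- pv_equiv track=rewrite | github.com/ahatahaTheProducer/chessGuesser | main.py | my_converter
-- ===== SOURCE A (Python) =====
-- def my_converter(a_list):
--     my_list = sorted(a_list)
--     headder = my_list[0][0:2]
--     last_list = list()
--     last_list.append([[headder], []])
--     counter = 0
--     for i in my_list:
--         if i[0:2] == headder:
--             last_list[counter][1].append(i[3:])
--         else:
--             headder = i[0:2]
--             last_list.append([[headder], [i[3:]]])
--             counter += 1
--     return last_list
-- ===== SOURCE B (Python) =====
-- def my_converter(a_list):
--     my_list = sorted(a_list)
--     groups = {}
--     for i in my_list:
--         groups.setdefault(i[0:2], []).append(i[3:])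
--     return [[[k], v] for k, v in groups.items()]
-- ===== Notes on version B (the rewrite author's own statement) =====
-- stated objective: idiomatic
-- what changed: Replaces A's headder/counter run-detection (if/else with in-place append into last_list[counter]) by a hash-indexed grouping dict built with setdefault in one unconditional pass, then a final build pass over dict.items(); dict insertion order equals A's run order because sorting puts equal prefixes contiguously.
import Mathlib
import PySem

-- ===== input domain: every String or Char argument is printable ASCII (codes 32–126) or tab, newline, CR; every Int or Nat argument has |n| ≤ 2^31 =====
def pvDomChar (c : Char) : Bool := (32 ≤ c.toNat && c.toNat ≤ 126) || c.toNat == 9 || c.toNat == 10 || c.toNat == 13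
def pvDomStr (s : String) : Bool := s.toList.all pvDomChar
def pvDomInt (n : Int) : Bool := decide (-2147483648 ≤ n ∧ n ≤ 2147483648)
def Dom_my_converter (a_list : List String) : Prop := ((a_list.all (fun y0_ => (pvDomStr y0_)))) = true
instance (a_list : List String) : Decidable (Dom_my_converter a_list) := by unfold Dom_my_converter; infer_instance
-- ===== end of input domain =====

-- B replaces A's headder/counter run-detection by a setdefault-grouping dict plus a final
-- build pass over its items (insertion order = A's run order on the sorted list); same cost,
-- different data structure; on the empty list A raises IndexError, B returns [].

-- ===== PORT A =====
-- loop state: (headder, last_list, counter)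
def myConvStep (st : String × List (List (List String)) × Nat) (i : String) :
    String × List (List (List String)) × Nat :=
  if PySem.Str.slice i (some 0) (some 2) == st.1 then
    (st.1,
     st.2.1.modify st.2.2 (fun e => e.modify 1 (fun items => items ++ [PySem.Str.slice i (some 3) none])),
     st.2.2)
  else
    let h := PySem.Str.slice i (some 0) (some 2)
    (h, st.2.1 ++ [[[h], [PySem.Str.slice i (some 3) none]]], st.2.2 + 1)

def my_converter (a_list : List String) : List (List (List String)) :=
  let my_list := PySem.List.sorted a_list (fun x => x) false
  match PySem.List.pyGet? my_list 0 with
  | none => []   -- my_list[0] raises IndexError here; excluded by Pre_my_converter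
  | some first =>
    let headder := PySem.Str.slice first (some 0) (some 2)
    (my_list.foldl myConvStep (headder, [[[headder], ([] : List String)]], 0)).2.1

-- ===== PORT B =====
-- groups.setdefault(i[0:2], []).append(i[3:])  ==  d[i[0:2]] = d.get(i[0:2], []) + [i[3:]]
def my_converter_alt (a_list : List String) : List (List (List String)) :=
  let my_list := PySem.List.sorted a_list (fun x => x) false
  let groups := my_list.foldl
    (fun d i => d.modify (PySem.Str.slice i (some 0) (some 2)) []
        (fun vs => vs ++ [PySem.Str.slice i (some 3) none]))
    PySem.Dict.empty
  groups.items.map (fun p => [[p.1], p.2])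

-- ===== PRECONDITION & SPEC =====
-- Pre_ excludes only the empty list: there A raises IndexError on my_list[0] (no return value).
def Pre_my_converter (a_list : List String) : Prop := a_list ≠ []
instance (a_list : List String) : Decidable (Pre_my_converter a_list) := by unfold Pre_my_converter; infer_instance
def pvWitness_my_converter : List String := ["ab cd", "ab ef", "zz"]

def Spec_my_converter (a_list : List String) (out : List (List (List String))) : Prop := out = my_converter_alt a_list
instance (a_list : List String) (out : List (List (List String))) : Decidable (Spec_my_converter a_list out) := by unfold Spec_my_converter; infer_instance

-- ===== CLAIM (what is proved, stated in full; the proofs are below) =====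
def Claim_equal_my_converter : Prop := ∀ (a_list : List String), Dom_my_converter a_list → Pre_my_converter a_list → Spec_my_converter a_list (my_converter a_list)

-- ===== LEMMAS AND PROOFS =====

def altPfx (s : String) : String := PySem.Str.slice s (some 0) (some 2)
def altTail3 (s : String) : String := PySem.Str.slice s (some 3) none

-- the run decomposition of the sorted list (proof-side bridge between the two ports)
def altGroups : List String → List (List (List String))
  | [] => []
  | x :: xs =>
    let h := altPfx x
    [[h], altTail3 x :: (xs.takeWhile (fun s => altPfx s == h)).map altTail3]
      :: altGroups (xs.dropWhile (fun s => altPfx s == h))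
termination_by l => l.length
decreasing_by simpa using Nat.lt_succ_of_le (List.length_dropWhile_le _ xs)

-- ---- A's fold is the run decomposition ----
lemma modify_append_last {α : Type} (L : List α) (e : α) (f : α → α) :
    (L ++ [e]).modify L.length f = L ++ [f e] := by
  induction L with
  | nil => simp [List.modify]
  | cons a t ih => simpa [List.modify] using ih

lemma fold_inv (l : List String) (h : String) (L : List (List (List String))) (items : List String) :
    (l.foldl myConvStep (h, L ++ [[[h], items]], L.length)).2.1 =
      L ++ [[[h], items ++ (l.takeWhile (fun s => altPfx s == h)).map altTail3]]
        ++ altGroups (l.dropWhile (fun s => altPfx s == h)) := by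
  induction l generalizing h L items with
  | nil => simp [altGroups]
  | cons i l' ih =>
    by_cases hc : altPfx i == h
    · have hstep : myConvStep (h, L ++ [[[h], items]], L.length) i =
          (h, L ++ [[[h], items ++ [altTail3 i]]], L.length) := by
        simp [myConvStep, altPfx, altTail3] at hc ⊢
        rw [if_pos hc, modify_append_last]
        simp [List.modify]
      rw [List.foldl_cons, hstep, ih]
      simp [hc]
    · have hstep : myConvStep (h, L ++ [[[h], items]], L.length) i =
          (altPfx i, (L ++ [[[h], items]]) ++ [[[altPfx i], [altTail3 i]]],
            (L ++ [[[h], items]]).length) := by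
        simp [myConvStep, altPfx, altTail3] at hc ⊢
        exact hc
      rw [List.foldl_cons, hstep, ih]
      conv_rhs => rw [altGroups.eq_def]
      simp [hc]

-- ---- order facts: the two-char prefix is monotone under the sort order ----
lemma nil_le_char (l : List Char) : ([] : List Char) ≤ l := by
  cases l with
  | nil => exact le_refl _
  | cons a t => exact le_of_lt (List.Lex.nil)

lemma take_le_of_lex {l1 l2 : List Char} (h : List.Lex (· < ·) l1 l2) (n : Nat) :
    l1.take n ≤ l2.take n := by
  induction h generalizing n with
  | nil => simpa using nil_le_char _
  | @rel a l1' b l2' hab =>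
    cases n with
    | zero => exact le_refl _
    | succ m => exact le_of_lt (List.Lex.rel hab)
  | @cons a l1' l2' h ih =>
    cases n with
    | zero => exact le_refl _
    | succ m =>
      rcases lt_or_eq_of_le (ih m) with hlt | heq
      · exact le_of_lt (List.Lex.cons hlt)
      · simp [List.take, heq]

lemma pfx_mono {s t : String} (h : s ≤ t) : altPfx s ≤ altPfx t := by
  have hs : (altPfx s).toList = s.toList.take 2 := by simp [altPfx, pysem]
  have ht : (altPfx t).toList = t.toList.take 2 := by simp [altPfx, pysem]
  rw [String.le_iff_toList_le] at h ⊢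
  rw [hs, ht]
  rcases lt_or_eq_of_le h with hlt | heq
  · exact take_le_of_lex hlt 2
  · simp [heq]

-- ---- set bookkeeping ----
lemma discard_not_mem {s : List String} {h : String} (hm : h ∉ s) : PySem.Set.discard s h = s := by
  rw [PySem.Set.discard, List.filter_eq_self]
  intro a ha
  simp only [Bool.not_eq_eq_eq_not, Bool.not_true, beq_eq_false_iff_ne, ne_eq]
  exact fun e => hm (e ▸ ha)

lemma discard_const_append {h : String} (A B : List String) (hA : ∀ a ∈ A, a = h) (hB : h ∉ B) :
    PySem.Set.discard (PySem.Set.ofList (A ++ B)) h = PySem.Set.ofList B := by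
  induction A with
  | nil =>
    exact discard_not_mem (fun hm => hB ((PySem.Set.mem_ofList _ _).mp hm))
  | cons a A' ih =>
    have ha : a = h := hA a (by simp)
    subst ha
    rw [List.cons_append, PySem.Set.ofList_cons]
    have : PySem.Set.discard (a :: PySem.Set.discard (PySem.Set.ofList (A' ++ B)) a) a
        = PySem.Set.discard (PySem.Set.discard (PySem.Set.ofList (A' ++ B)) a) a := by
      simp [PySem.Set.discard]
    rw [this, ih (fun b hb => hA b (by simp [hb]))]
    exact discard_not_mem (fun hm => hB ((PySem.Set.mem_ofList _ _).mp hm))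


-- ---- the run decomposition is B's dict layout on a sorted list ----
lemma groups_eq (l : List String) (hp : l.Pairwise (· ≤ ·)) :
    altGroups l = (PySem.Set.ofList (l.map altPfx)).map
      (fun k => [[k], (l.filter (fun s => altPfx s == k)).map altTail3]) := by
  induction l using altGroups.induct with
  | case1 => simp [altGroups]
  | case2 x xs h ih =>
    rw [List.pairwise_cons] at hp
    obtain ⟨hge, hxsp⟩ := hp
    set tk := xs.takeWhile (fun s => altPfx s == h) with htk
    set dr := xs.dropWhile (fun s => altPfx s == h) with hdr
    have hxs : tk ++ dr = xs := List.takeWhile_append_dropWhile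
    have hdrp : dr.Pairwise (· ≤ ·) := hxsp.sublist (xs.dropWhile_sublist _)
    have htkh : ∀ s ∈ tk, altPfx s = h := by
      intro s hs
      have := List.mem_takeWhile_imp hs
      simpa using this
    have hnot : ∀ s ∈ dr, altPfx s ≠ h := by
      cases hcd : dr with
      | nil => simp
      | cons y t =>
        have hy : (fun s => altPfx s == h) y = false := by
          have := List.head?_dropWhile_not (fun s => altPfx s == h) xs
          rw [← hdr, hcd] at this
          simpa using this
        simp only [beq_eq_false_iff_ne, ne_eq] at hy
        intro s hs heq
        have hxy : x ≤ y := hge y (by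
          have : y ∈ dr := by rw [hcd]; simp
          exact (xs.dropWhile_sublist _).subset this)
        have hhy : h ≤ altPfx y := pfx_mono hxy
        rcases List.mem_cons.mp hs with rfl | hs
        · exact hy heq
        · have hys : y ≤ s := List.rel_of_pairwise_cons (hcd ▸ hdrp) hs
          have : altPfx y ≤ h := heq ▸ pfx_mono hys
          exact hy (le_antisymm this hhy)
    have hmap : (x :: xs).map altPfx = h :: (tk.map altPfx ++ dr.map altPfx) := by
      rw [← hxs]; simp; rfl
    have hofl : PySem.Set.ofList ((x :: xs).map altPfx)
        = h :: PySem.Set.ofList (dr.map altPfx) := by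
      rw [hmap, PySem.Set.ofList_cons, discard_const_append]
      · intro a ha
        obtain ⟨s, hs, rfl⟩ := List.mem_map.mp ha
        exact htkh s hs
      · intro hm
        obtain ⟨s, hs, he⟩ := List.mem_map.mp hm
        exact hnot s hs he
    have hfh : (x :: xs).filter (fun s => altPfx s == h) = x :: tk := by
      rw [← hxs, List.filter_cons_of_pos (p := fun s => altPfx s == h) (beq_self_eq_true _), List.filter_append]
      have h1 : tk.filter (fun s => altPfx s == h) = tk :=
        List.filter_eq_self.mpr (fun s hs => by simp [htkh s hs])
      have h2 : dr.filter (fun s => altPfx s == h) = [] :=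
        List.filter_eq_nil_iff.mpr (fun s hs => by simp [hnot s hs])
      rw [h1, h2, List.append_nil]
    have hfk : ∀ k ∈ PySem.Set.ofList (dr.map altPfx),
        (x :: xs).filter (fun s => altPfx s == k) = dr.filter (fun s => altPfx s == k) := by
      intro k hk
      have hk' : k ∈ dr.map altPfx := (PySem.Set.mem_ofList _ _).mp hk
      obtain ⟨sk, hsk, rfl⟩ := List.mem_map.mp hk'
      have hkh : altPfx sk ≠ h := hnot sk hsk
      have hx0 : (altPfx x == altPfx sk) = false := by
        simpa using fun e : altPfx x = altPfx sk => hkh e.symm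
      rw [← hxs, List.filter_cons_of_neg (p := fun s => altPfx s == altPfx sk) (by simp [hx0]), List.filter_append]
      rw [List.filter_eq_nil_iff.mpr (fun s hs => by
          rw [htkh s hs]; simpa using Ne.symm hkh),
        List.nil_append]
    conv_lhs => rw [altGroups.eq_def]
    rw [hofl, List.map_cons, hfh]
    simp only [List.map_cons]
    congr 1
    rw [ih hdrp]
    exact (List.map_congr_left (fun k hk => by rw [hfk k hk])).symm

-- ---- B's dict items, characterised ----
lemma alt_items (l : List String) :
    (l.foldl
      (fun d i => d.modify (PySem.Str.slice i (some 0) (some 2)) []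
          (fun vs => vs ++ [PySem.Str.slice i (some 3) none]))
      PySem.Dict.empty).items
    = (PySem.Set.ofList (l.map altPfx)).map
        (fun k => (k, (l.filter (fun s => altPfx s == k)).map altTail3)) := by
  have hfold :
      (l.foldl
        (fun d i => d.modify (PySem.Str.slice i (some 0) (some 2)) []
            (fun vs => vs ++ [PySem.Str.slice i (some 3) none]))
        PySem.Dict.empty)
      = ((l.map (fun i => (altPfx i, altTail3 i))).foldl
          (fun d p => d.modify p.1 [] (fun vs => vs ++ [p.2])) PySem.Dict.empty) := by
    rw [List.foldl_map]
    rfl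
  rw [hfold]
  have hnd : ((l.map (fun i => (altPfx i, altTail3 i))).foldl
      (fun d p => d.modify p.1 [] (fun vs => vs ++ [p.2])) PySem.Dict.empty).keys.Nodup := by
    exact PySem.Dict.nodup_keys_foldl_modify_key _ Prod.fst [] (fun _ p => (· ++ [p.2])) _
      PySem.Dict.nodup_keys_empty
  rw [PySem.Dict.items_eq_map_keys _ hnd []]
  have hkeys : ((l.map (fun i => (altPfx i, altTail3 i))).foldl
      (fun d p => d.modify p.1 [] (fun vs => vs ++ [p.2])) PySem.Dict.empty).keys
      = PySem.Set.ofList (l.map altPfx) := by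
    rw [PySem.Dict.keys_foldl_modify_key]
    simp [PySem.Set.update_nil_left]
    rfl
  rw [hkeys]
  apply List.map_congr_left
  intro k _
  rw [PySem.Dict.getD_foldl_modify_append]
  rw [PySem.Dict.getD_empty]
  simp only [List.filter_map, List.map_map]
  rfl

-- ===== VERDICT (by name: the statement is the Claim_ definition above) =====
theorem my_converter_spec : Claim_equal_my_converter := by
  intro a_list _ hpre
  unfold Spec_my_converter my_converter my_converter_alt
  have hne : PySem.List.sorted a_list (fun x => x) false ≠ [] := by
    intro hnil
    exact hpre ((PySem.List.sorted_eq_nil_iff _ _ _).mp hnil)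
  have hpair : (PySem.List.sorted a_list (fun x => x) false).Pairwise (· ≤ ·) :=
    PySem.List.sorted_pairwise a_list (fun x => x)
  obtain ⟨x, xs, hx⟩ := List.exists_cons_of_ne_nil hne
  rw [hx] at hpair ⊢
  simp only [PySem.List.pyGet?_zero_cons]
  have hfirst : myConvStep (PySem.Str.slice x (some 0) (some 2),
      [[[PySem.Str.slice x (some 0) (some 2)], ([] : List String)]], 0) x =
      (altPfx x, [] ++ [[[altPfx x], [altTail3 x]]], ([] : List (List (List String))).length) := by
    simp [myConvStep, altPfx, altTail3, List.modify]
  rw [List.foldl_cons, hfirst, fold_inv]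
  rw [alt_items, List.map_map]
  rw [show ((fun p : String × List String => [[p.1], p.2]) ∘
      (fun k => (k, ((x :: xs).filter (fun s => altPfx s == k)).map altTail3))) =
      (fun k => [[k], ((x :: xs).filter (fun s => altPfx s == k)).map altTail3]) from rfl]
  rw [← groups_eq _ hpair]
  conv_rhs => rw [altGroups.eq_def]
  simp
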